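-- pv_equiv track=rewrite | github.com/cmbenello/141-discussion-final | solutions/conditionals_loops_sols.py | cl_27_count_pairs_with_diff_at_most
-- ===== SOURCE A (Python) =====
-- from typing import List, Optional
--
-- def cl_27_count_pairs_with_diff_at_most(lst: List[int], d: int) -> int:
--     if d < 0:
--         raise ValueError("d must be non-negative")
--
--     count = 0
--     for i in range(len(lst)):
--         for j in range(i + 1, len(lst)):
--             if abs(lst[i] - lst[j]) <= d:
--                 count += 1
--     return count
-- ===== SOURCE B (Python) =====
-- def cl_27_count_pairs_with_diff_at_most(lst, d):
--     if d < 0: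
--         raise ValueError("d must be non-negative")
--     s = sorted(lst)
--     count = 0
--     left = 0
--     for right in range(len(s)):
--         while s[right] - s[left] > d:
--             left += 1
--         count += right - left
--     return count
-- ===== Notes on version B (the rewrite author's own statement) =====
-- stated objective: faster
-- what changed: Replaced the quadratic all-pairs double loop by sorting the list and counting, for each right endpoint, the window of earlier elements within d via a monotone two-pointer sweep.
import Mathlib
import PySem

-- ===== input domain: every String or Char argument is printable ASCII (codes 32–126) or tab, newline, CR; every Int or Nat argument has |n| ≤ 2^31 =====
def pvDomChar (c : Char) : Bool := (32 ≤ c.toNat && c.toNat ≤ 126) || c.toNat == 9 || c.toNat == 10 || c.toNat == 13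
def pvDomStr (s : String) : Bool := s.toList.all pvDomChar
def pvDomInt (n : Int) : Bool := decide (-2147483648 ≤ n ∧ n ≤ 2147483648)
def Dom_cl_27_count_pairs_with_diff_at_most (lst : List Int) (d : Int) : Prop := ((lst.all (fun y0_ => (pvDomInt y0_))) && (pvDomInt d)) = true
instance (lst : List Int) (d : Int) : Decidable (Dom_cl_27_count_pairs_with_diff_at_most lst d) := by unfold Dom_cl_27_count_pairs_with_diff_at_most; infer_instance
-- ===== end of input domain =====

-- B replaces A's quadratic all-pairs double loop by sort + two-pointer window counting (asymptotically faster); A = B proved for d ≥ 0 (both Pythons raise ValueError for d < 0).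


-- ===== PORT A =====
-- literal port of A's double loop; the 'd < 0: raise ValueError' branch is the non-returning
-- path excluded by Pre_ (it produces no value)
def cl_27_count_pairs_with_diff_at_most (lst : List Int) (d : Int) : Int :=
  (PySem.List.pyRange 0 (lst.length : Int) 1).foldl (fun count i =>
    (PySem.List.pyRange (i + 1) (lst.length : Int) 1).foldl (fun count j =>
      if |PySem.List.pyGetD lst i 0 - PySem.List.pyGetD lst j 0| ≤ d then count + 1 else count)
      count) 0

-- ===== PORT B =====
-- the 'while s[right] - s[left] > d: left += 1' loop; the l < s.length guard only makes the
-- recursion total (under Pre_ the pointer never passes 'right', hence never leaves the list)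
def pvAdvance (s : List Int) (d rv : Int) (l : Nat) : Nat :=
  if h : l < s.length then
    if d < rv - s.getD l 0 then pvAdvance s d rv (l + 1) else l
  else l
termination_by s.length - l

-- literal port of B (Source B); 'right' ranges over the (always non-negative) indices of s,
-- hence List.range; s[right] is s.getD right 0 (right < length throughout, exact)
-- the 'for right in range(len(s))' loop over the sorted list s, state = (count, left)
def pvTwoPointer (s : List Int) (d : Int) : Int :=
  ((List.range s.length).foldl (fun (st : Int × Nat) r =>
      let l := pvAdvance s d (s.getD r 0) st.2
      (st.1 + ((r : Int) - (l : Int)), l)) ((0 : Int), (0 : Nat))).1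

def cl_27_count_pairs_with_diff_at_most_alt (lst : List Int) (d : Int) : Int :=
  pvTwoPointer (PySem.List.sorted lst (fun x => x) false) d

-- ===== PRECONDITION & SPEC =====
-- Pre_ excludes exactly d < 0, where Python A raises ValueError (and B raises too)
def Pre_cl_27_count_pairs_with_diff_at_most (_lst : List Int) (d : Int) : Prop := 0 ≤ d
instance (lst : List Int) (d : Int) : Decidable (Pre_cl_27_count_pairs_with_diff_at_most lst d) := by unfold Pre_cl_27_count_pairs_with_diff_at_most; infer_instance
def pvWitness_cl_27_count_pairs_with_diff_at_most : List Int × Int := ([1, 3, 2], 1)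

def Spec_cl_27_count_pairs_with_diff_at_most (lst : List Int) (d : Int) (out : Int) : Prop := out = cl_27_count_pairs_with_diff_at_most_alt lst d
instance (lst : List Int) (d : Int) (out : Int) : Decidable (Spec_cl_27_count_pairs_with_diff_at_most lst d out) := by unfold Spec_cl_27_count_pairs_with_diff_at_most; infer_instance

-- ===== CLAIM (what is proved, stated in full; the proofs are below) =====
def Claim_equal_cl_27_count_pairs_with_diff_at_most : Prop := ∀ (lst : List Int) (d : Int), Dom_cl_27_count_pairs_with_diff_at_most lst d → Pre_cl_27_count_pairs_with_diff_at_most lst d → Spec_cl_27_count_pairs_with_diff_at_most lst d (cl_27_count_pairs_with_diff_at_most lst d)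

-- ===== LEMMAS AND PROOFS =====

-- the common value: number of pairs i < j with |lst i - lst j| ≤ d, head-against-tail recursion
def pvPC (d : Int) : List Int → Nat
  | [] => 0
  | x :: xs => xs.countP (fun y => decide (|x - y| ≤ d)) + pvPC d xs

lemma pvPC_perm (d : Int) {l1 l2 : List Int} (h : l1.Perm l2) : pvPC d l1 = pvPC d l2 := by
  induction h with
  | nil => rfl
  | cons x h ih => simp [pvPC, ih, h.countP_eq]
  | swap x y l =>
      simp only [pvPC, List.countP_cons]
      have : (decide (|y - x| ≤ d)) = (decide (|x - y| ≤ d)) := by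
        rw [abs_sub_comm]
      rw [this]
      omega
  | trans h1 h2 ih1 ih2 => exact ih1.trans ih2

lemma pvPC_append_singleton (d : Int) : ∀ (l : List Int) (x : Int),
    pvPC d (l ++ [x]) = pvPC d l + l.countP (fun y => decide (|y - x| ≤ d)) := by
  intro l x
  induction l with
  | nil => simp [pvPC]
  | cons h t ih =>
      simp only [List.cons_append, pvPC, List.countP_append, List.countP_cons, ih,
        List.countP_nil]
      have hx : (decide (|h - x| ≤ d)) = (decide (|x - h| ≤ d)) := by rw [abs_sub_comm]
      omega

-- A's double loop computes pvPC
lemma pv_rows_eq_pc (d : Int) : ∀ (lst : List Int) (c : Int),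
    (List.range lst.length).foldl
      (fun c k => c + (((lst.drop (k + 1)).countP (fun y => decide (|lst.getD k 0 - y| ≤ d)) : Nat) : Int)) c
      = c + (pvPC d lst : Int) := by
  intro lst
  induction lst with
  | nil => intro c; simp [pvPC]
  | cons x xs ih =>
      intro c
      rw [List.length_cons, List.range_succ_eq_map, List.foldl_cons, List.foldl_map]
      simp only [List.drop_succ_cons, List.getD_cons_succ, List.getD_cons_zero, Nat.succ_eq_add_one]
      rw [ih]
      simp [pvPC]
      omega

lemma pvA_eq_pc (lst : List Int) (d : Int) :
    cl_27_count_pairs_with_diff_at_most lst d = (pvPC d lst : Int) := by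
  unfold cl_27_count_pairs_with_diff_at_most
  have hinner : ∀ (c : Int) (i : Int), 0 ≤ i → i < lst.length →
      (PySem.List.pyRange (i + 1) (lst.length : Int) 1).foldl (fun count j =>
        if |PySem.List.pyGetD lst i 0 - PySem.List.pyGetD lst j 0| ≤ d then count + 1 else count) c
      = c + (((lst.drop (i.toNat + 1)).countP (fun y => decide (|lst.getD i.toNat 0 - y| ≤ d)) : Nat) : Int) := by
    intro c i h0 hl
    rw [PySem.List.foldl_pyRange_pyGetD' lst 0
      (f := fun count y => if |PySem.List.pyGetD lst i 0 - y| ≤ d then count + 1 else count)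
      (init := c) (a := i + 1) (by omega)]
    rw [PySem.List.foldl_ite_add_one]
    have ht : (i + 1).toNat = i.toNat + 1 := by omega
    rw [ht, PySem.List.pyGetD_eq_getElem lst 0 h0 hl,
      List.getD_eq_getElem lst 0 (by omega : i.toNat < lst.length)]
  rw [PySem.List.foldl_congr_mem _ _
    (fun c i => c + (((lst.drop (i.toNat + 1)).countP
        (fun y => decide (|lst.getD i.toNat 0 - y| ≤ d)) : Nat) : Int)) 0
    (by
      intro acc x hx
      rw [PySem.List.mem_pyRange_one] at hx
      exact hinner acc x hx.1 hx.2)]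
  rw [PySem.List.pyRange_zero_natCast, List.foldl_map]
  simpa using pv_rows_eq_pc d lst 0


-- pvAdvance facts (proved by its own recursion)
lemma pvAdvance_stop (s : List Int) (d rv : Int) : ∀ l,
    pvAdvance s d rv l < s.length → ¬ d < rv - s.getD (pvAdvance s d rv l) 0 := by
  intro l
  fun_induction pvAdvance with
  | case1 l h hc ih => exact ih
  | case2 l h hc => intro _; exact hc
  | case3 l h => intro h'; omega

lemma pvAdvance_skipped (s : List Int) (d rv : Int) : ∀ l i,
    l ≤ i → i < pvAdvance s d rv l → d < rv - s.getD i 0 := by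
  intro l
  fun_induction pvAdvance with
  | case1 l h hc ih =>
      intro i h1 h2
      rcases Nat.eq_or_lt_of_le h1 with rfl | h1'
      · exact hc
      · exact ih i h1' h2
  | case2 l h hc => intro i h1 h2; omega
  | case3 l h => intro i h1 h2; omega

lemma pvAdvance_le_of_stop (s : List Int) (d rv : Int) : ∀ l m,
    l ≤ m → ¬ d < rv - s.getD m 0 → pvAdvance s d rv l ≤ m := by
  intro l
  fun_induction pvAdvance with
  | case1 l h hc ih =>
      intro m h1 h2
      rcases Nat.eq_or_lt_of_le h1 with rfl | h1'
      · exact absurd hc h2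
      · exact ih m h1' h2
  | case2 l h hc => intro m h1 _; exact h1
  | case3 l h => intro m h1 _; exact h1

-- the window counted at step r equals r - left
lemma pv_window_count (s : List Int) (d : Int) (hs : s.Pairwise (· ≤ ·)) (r l1 : Nat)
    (hr : r < s.length) (hl : l1 ≤ r)
    (hfail : ∀ i < l1, d < s.getD r 0 - s.getD i 0)
    (hstop : ¬ d < s.getD r 0 - s.getD l1 0) :
    (s.take r).countP (fun y => decide (|y - s.getD r 0| ≤ d)) = r - l1 := by
  have hpw := List.pairwise_iff_getElem.mp hs
  have hgr : s.getD r 0 = s[r] := List.getD_eq_getElem s 0 hr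
  have hsplit : s.take r = s.take l1 ++ (s.take r).drop l1 := by
    conv_lhs => rw [← List.take_append_drop l1 (s.take r)]
    rw [List.take_take, Nat.min_eq_left hl]
  rw [hsplit, List.countP_append]
  have h1 : (s.take l1).countP (fun y => decide (|y - s.getD r 0| ≤ d)) = 0 := by
    apply List.countP_eq_zero.mpr
    intro a ha
    obtain ⟨i, hi, hai⟩ := List.mem_iff_getElem.mp ha
    have hil : i < l1 := by simp [List.length_take] at hi; omega
    have his : i < s.length := by omega
    rw [List.getElem_take] at hai
    have hle : s[i] ≤ s[r] := hpw i r his hr (by omega)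
    have hf := hfail i hil
    rw [hgr, List.getD_eq_getElem s 0 his] at hf
    subst hai
    simp only [hgr, decide_eq_true_eq]
    intro habs
    rw [abs_sub_comm, abs_of_nonneg (by omega)] at habs
    omega
  have h2 : ((s.take r).drop l1).countP (fun y => decide (|y - s.getD r 0| ≤ d))
      = ((s.take r).drop l1).length := by
    apply List.countP_eq_length.mpr
    intro a ha
    obtain ⟨i, hi, hai⟩ := List.mem_iff_getElem.mp ha
    rw [List.getElem_drop, List.getElem_take] at hai
    have hlen : ((s.take r).drop l1).length = r - l1 := by simp; omega
    have hib : l1 + i < r := by rw [hlen] at hi; omega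
    have his : l1 + i < s.length := by omega
    have hl1s : l1 < s.length := by omega
    have hle1 : s[l1] ≤ s[l1 + i] := by
      rcases Nat.eq_zero_or_pos i with rfl | hip
      · simp
      · exact hpw l1 (l1 + i) hl1s his (by omega)
    have hle2 : s[l1 + i] ≤ s[r] := hpw (l1 + i) r his hr hib
    rw [hgr, List.getD_eq_getElem s 0 hl1s] at hstop
    subst hai
    simp only [hgr, decide_eq_true_eq]
    rw [abs_sub_comm, abs_of_nonneg (by omega)]
    omega
  rw [h1, h2]
  simp
  omega

-- B's two-pointer loop computes pvPC of the sorted list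
lemma pvB_loop (s : List Int) (d : Int) (hd : 0 ≤ d) (hs : s.Pairwise (· ≤ ·)) :
    ∀ (k r0 : Nat) (c : Int) (l0 : Nat),
      r0 + k = s.length →
      l0 ≤ r0 →
      (r0 < s.length → ∀ i < l0, d < s.getD r0 0 - s.getD i 0) →
      ((List.range' r0 k).foldl (fun (st : Int × Nat) r =>
          let l := pvAdvance s d (s.getD r 0) st.2
          (st.1 + ((r : Int) - (l : Int)), l)) (c, l0)).1
        = c + (pvPC d (s.take (r0 + k)) : Int) - (pvPC d (s.take r0) : Int) := by
  intro k
  induction k with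
  | zero => intro r0 c l0 _ _ _; simp
  | succ k ih =>
      intro r0 c l0 hlen hl0 hinv
      have hr0 : r0 < s.length := by omega
      rw [List.range'_succ, List.foldl_cons]
      simp only []
      set rv := s.getD r0 0 with hrv
      set l1 := pvAdvance s d rv l0 with hl1
      -- l1 ≤ r0 since the condition fails at r0 itself
      have hstopr0 : ¬ d < rv - s.getD r0 0 := by rw [hrv]; omega
      have hl1r0 : l1 ≤ r0 := pvAdvance_le_of_stop s d rv l0 r0 hl0 hstopr0
      have hl1len : l1 < s.length := by omega
      have hfail1 : ∀ i < l1, d < rv - s.getD i 0 := by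
        intro i hi
        rcases Nat.lt_or_ge i l0 with h | h
        · exact hinv hr0 i h
        · exact pvAdvance_skipped s d rv l0 i h hi
      have hstop1 : ¬ d < rv - s.getD l1 0 := pvAdvance_stop s d rv l0 hl1len
      have hwin := pv_window_count s d hs r0 l1 hr0 hl1r0 hfail1 hstop1
      -- pvPC of take (r0+1)
      have htake : s.take (r0 + 1) = s.take r0 ++ [s.getD r0 0] := by
        have hget : s.getD r0 0 = s[r0] := List.getD_eq_getElem s 0 hr0
        rw [List.take_add_one, List.getElem?_eq_getElem hr0, hget]
        simp
      have hpc1 : pvPC d (s.take (r0 + 1))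
          = pvPC d (s.take r0) + (r0 - l1) := by
        rw [htake, pvPC_append_singleton, ← hrv, hwin]
      -- invariant for the next step
      have hinv' : r0 + 1 < s.length → ∀ i < l1, d < s.getD (r0 + 1) 0 - s.getD i 0 := by
        intro hr1 i hi
        have hmono : s.getD r0 0 ≤ s.getD (r0 + 1) 0 := by
          rw [List.getD_eq_getElem s 0 hr0, List.getD_eq_getElem s 0 hr1]
          exact (List.pairwise_iff_getElem.mp hs) r0 (r0 + 1) hr0 hr1 (by omega)
        have := hfail1 i hi
        rw [hrv] at this
        omega
      have hrec := ih (r0 + 1) (c + ((r0 : Int) - (l1 : Int))) l1 (by omega) (by omega) hinv'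
      have hidx : r0 + 1 + k = r0 + (k + 1) := by omega
      rw [hidx] at hrec
      rw [hrec, hpc1]
      push_cast
      omega


lemma pvB_eq_pc (lst : List Int) (d : Int) (hd : 0 ≤ d) :
    cl_27_count_pairs_with_diff_at_most_alt lst d
      = (pvPC d (PySem.List.sorted lst (fun x => x) false) : Int) := by
  unfold cl_27_count_pairs_with_diff_at_most_alt pvTwoPointer
  have hs : (PySem.List.sorted lst (fun x => x) false).Pairwise (· ≤ ·) :=
    PySem.List.sorted_pairwise lst (fun x => x)
  rw [List.range_eq_range']
  have := pvB_loop (PySem.List.sorted lst (fun x => x) false) d hd hs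
    (PySem.List.sorted lst (fun x => x) false).length 0 0 0 (by omega) (le_refl 0)
    (by intro _ i hi; omega)
  rw [this]
  have htl : List.take (0 + (PySem.List.sorted lst (fun x => x) false).length)
      (PySem.List.sorted lst (fun x => x) false) = PySem.List.sorted lst (fun x => x) false := by
    rw [Nat.zero_add, List.take_length]
  rw [htl]
  simp [pvPC]

-- ===== VERDICT (by name: the statement is the Claim_ definition above) =====
theorem cl_27_count_pairs_with_diff_at_most_spec : Claim_equal_cl_27_count_pairs_with_diff_at_most := by
  intro lst d _ hpre
  unfold Spec_cl_27_count_pairs_with_diff_at_most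
  rw [pvA_eq_pc, pvB_eq_pc lst d hpre,
    pvPC_perm d (PySem.List.sorted_perm (xs := lst) (key := fun x => x) (rev := false))]
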